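-- pv_equiv track=rewrite | github.com/Johndsalas/decoding_activity | group2.py | multiply_letters_decryption
-- ===== SOURCE A (Python) =====
-- def multiply_letters_decryption(message, multiplier = 5):
--
--     count = 0
--
--     new_message =''
--
--     for letter in message:
--
--         if letter.isalpha():
--
--             count += 1
--
--             if count % multiplier == 0:
--
--                 new_message += letter
--
--         else:
--
--             new_message += ' '
--
--     return new_message
-- ===== SOURCE B (Python) =====
-- def multiply_letters_decryption(message, multiplier = 5):
--     # Pass 1: choose surviving letters - indices whose alpha-rank is divisible by multiplier.
--     kept = set()
--     rank = 0
--     for i, ch in enumerate(message):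
--         if ch.isalpha():
--             rank += 1
--             if rank % multiplier == 0:
--                 kept.add(i)
--     # Pass 2: assemble the output.
--     out = []
--     for i, ch in enumerate(message):
--         if not ch.isalpha():
--             out.append(' ')
--         elif i in kept:
--             out.append(ch)
--     return ''.join(out)
-- ===== Notes on version B (the rewrite author's own statement) =====
-- stated objective: alternative
-- what changed: Replaced the single fused loop by two phases: a first pass that collects into a set the indices of letters whose alpha-rank is divisible by multiplier, and a second pass that assembles the output from that set.
import Mathlib
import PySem

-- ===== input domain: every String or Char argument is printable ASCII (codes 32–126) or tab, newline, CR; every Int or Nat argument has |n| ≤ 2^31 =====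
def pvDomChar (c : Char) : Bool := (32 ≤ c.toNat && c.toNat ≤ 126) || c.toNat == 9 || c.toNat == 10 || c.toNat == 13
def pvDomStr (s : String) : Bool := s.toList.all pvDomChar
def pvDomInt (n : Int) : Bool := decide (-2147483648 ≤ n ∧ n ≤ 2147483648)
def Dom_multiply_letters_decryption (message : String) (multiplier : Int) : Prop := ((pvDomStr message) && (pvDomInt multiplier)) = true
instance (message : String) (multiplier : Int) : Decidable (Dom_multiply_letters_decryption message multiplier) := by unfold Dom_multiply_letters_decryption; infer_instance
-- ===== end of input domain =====

-- B replaces A's single fused loop by two phases (collect the set of kept letter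
-- indices, then assemble the output from it); equivalence of return values is proved.

-- ===== PORT A =====
-- one fused loop, state (count, new_message)
def multiply_letters_decryption (message : String) (multiplier : Int) : String :=
  let st := message.toList.foldl
    (fun (st : Int × List Char) letter =>
      if PySem.Chars.isalpha letter then
        if PySem.Int.mod (st.1 + 1) multiplier == 0 then (st.1 + 1, st.2 ++ [letter])
        else (st.1 + 1, st.2)
      else (st.1, st.2 ++ [' '])) (0, [])
  String.ofList st.2

-- ===== PORT B =====
-- pass 1: set of kept indices; pass 2: assemble from the set
def multiply_letters_decryption_alt (message : String) (multiplier : Int) : String :=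
  let kept := (PySem.List.enumerate message.toList).foldl
    (fun (st : Int × PySem.Set Int) p =>
      if PySem.Chars.isalpha p.2 then
        if PySem.Int.mod (st.1 + 1) multiplier == 0 then (st.1 + 1, PySem.Set.add st.2 p.1)
        else (st.1 + 1, st.2)
      else st) (0, PySem.Set.empty)
  let out := (PySem.List.enumerate message.toList).foldl
    (fun (acc : List Char) p =>
      if !(PySem.Chars.isalpha p.2) then acc ++ [' ']
      else if PySem.Set.contains kept.2 p.1 then acc ++ [p.2]
      else acc) []
  String.ofList out

-- ===== PRECONDITION & SPEC =====
-- Pre_ excludes exactly the inputs where Python raises ZeroDivisionError: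
-- multiplier == 0 together with at least one alphabetic character in the message.
def Pre_multiply_letters_decryption (message : String) (multiplier : Int) : Prop :=
  multiplier ≠ 0 ∨ message.toList.all (fun c => !PySem.Chars.isalpha c) = true
instance (message : String) (multiplier : Int) : Decidable (Pre_multiply_letters_decryption message multiplier) := by
  unfold Pre_multiply_letters_decryption; infer_instance

def pvWitness_multiply_letters_decryption : String × Int := ("Hello, World!", 2)

def Spec_multiply_letters_decryption (message : String) (multiplier : Int) (out : String) : Prop := out = multiply_letters_decryption_alt message multiplier
instance (message : String) (multiplier : Int) (out : String) : Decidable (Spec_multiply_letters_decryption message multiplier out) := by unfold Spec_multiply_letters_decryption; infer_instance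

-- ===== CLAIM (what is proved, stated in full; the proofs are below) =====
def Claim_equal_multiply_letters_decryption : Prop := ∀ (message : String) (multiplier : Int), Dom_multiply_letters_decryption message multiplier → Pre_multiply_letters_decryption message multiplier → Spec_multiply_letters_decryption message multiplier (multiply_letters_decryption message multiplier)

-- ===== LEMMAS AND PROOFS =====

-- the list of indices B's first pass keeps, scanning l from position i with alpha-count c
def keptIdx (l : List Char) (i c m : Int) : List Int :=
  match l with
  | [] => []
  | ch :: cs =>
    if PySem.Chars.isalpha ch then
      if PySem.Int.mod (c + 1) m == 0 then i :: keptIdx cs (i + 1) (c + 1) m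
      else keptIdx cs (i + 1) (c + 1) m
    else keptIdx cs (i + 1) c m

theorem keptIdx_ge (l : List Char) (i c m j : Int) (hj : j ∈ keptIdx l i c m) : i ≤ j := by
  induction l generalizing i c with
  | nil => simp [keptIdx] at hj
  | cons ch cs ih =>
    simp only [keptIdx] at hj
    split at hj
    · split at hj
      · rcases List.mem_cons.mp hj with h | h
        · omega
        · have := ih (i + 1) (c + 1) h; omega
      · have := ih (i + 1) (c + 1) hj; omega
    · have := ih (i + 1) c hj; omega

-- B's first pass computes (final count, s ++ keptIdx …) when its set accumulator s holds only indices < i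
theorem pass1_eq (m : Int) (l : List Char) (i c : Int) (s : PySem.Set Int)
    (hs : ∀ j ∈ s, j < i) :
    (PySem.List.enumerate l i).foldl
      (fun (st : Int × PySem.Set Int) p =>
        if PySem.Chars.isalpha p.2 then
          if PySem.Int.mod (st.1 + 1) m == 0 then (st.1 + 1, PySem.Set.add st.2 p.1)
          else (st.1 + 1, st.2)
        else st) (c, s)
    = ((l.foldl (fun acc ch => if PySem.Chars.isalpha ch then acc + 1 else acc) c),
       s ++ keptIdx l i c m) := by
  induction l generalizing i c s with
  | nil => simp [PySem.List.enumerate_nil, keptIdx]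
  | cons ch cs ih =>
    rw [PySem.List.enumerate_cons]
    simp only [List.foldl_cons, keptIdx]
    by_cases ha : PySem.Chars.isalpha ch
    · simp only [ha, if_true]
      by_cases hm : PySem.Int.mod (c + 1) m == 0
      · simp only [hm, if_true]
        have hni : i ∉ s := fun h => absurd (hs i h) (by omega)
        rw [PySem.Set.add_of_not_mem hni]
        rw [ih (i + 1) (c + 1) (s ++ [i]) (by intro j hj; rcases List.mem_append.mp hj with h | h
                                              · have := hs j h; omega
                                              · simp at h; omega)]
        simp
      · simp only [hm, Bool.false_eq_true, if_false]
        rw [ih (i + 1) (c + 1) s (fun j hj => by have := hs j hj; omega)]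
    · simp only [ha, Bool.false_eq_true, if_false]
      rw [ih (i + 1) c s (fun j hj => by have := hs j hj; omega)]

-- B's second pass, driven by the set pre ++ keptIdx l i c m, rebuilds exactly A's fused loop output
theorem pass2_eq (m : Int) (l : List Char) (i c : Int) (pre : List Int) (acc : List Char)
    (hpre : ∀ j ∈ pre, j < i) :
    (PySem.List.enumerate l i).foldl
      (fun (acc : List Char) p =>
        if !(PySem.Chars.isalpha p.2) then acc ++ [' ']
        else if PySem.Set.contains (pre ++ keptIdx l i c m) p.1 then acc ++ [p.2]
        else acc) acc
    = (l.foldl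
        (fun (st : Int × List Char) letter =>
          if PySem.Chars.isalpha letter then
            if PySem.Int.mod (st.1 + 1) m == 0 then (st.1 + 1, st.2 ++ [letter])
            else (st.1 + 1, st.2)
          else (st.1, st.2 ++ [' '])) (c, acc)).2 := by
  induction l generalizing i c pre acc with
  | nil => simp [PySem.List.enumerate_nil]
  | cons ch cs ih =>
    rw [PySem.List.enumerate_cons]
    simp only [List.foldl_cons, keptIdx]
    by_cases ha : PySem.Chars.isalpha ch
    · simp only [ha, if_true, Bool.not_true, Bool.false_eq_true, if_false]
      by_cases hm : PySem.Int.mod (c + 1) m == 0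
      · simp only [hm, if_true]
        have hmem : PySem.Set.contains (pre ++ i :: keptIdx cs (i + 1) (c + 1) m) i = true := by
          rw [PySem.Set.contains_iff]; simp
        rw [hmem]; simp only [if_true]
        have heq : pre ++ i :: keptIdx cs (i + 1) (c + 1) m
            = (pre ++ [i]) ++ keptIdx cs (i + 1) (c + 1) m := by simp
        rw [heq]
        exact ih (i + 1) (c + 1) (pre ++ [i]) (acc ++ [ch])
          (by intro j hj; rcases List.mem_append.mp hj with h | h
              · have := hpre j h; omega
              · simp at h; omega)
      · simp only [hm, Bool.false_eq_true, if_false]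
        have hmem : PySem.Set.contains (pre ++ keptIdx cs (i + 1) (c + 1) m) i = false := by
          rw [← Bool.not_eq_true, PySem.Set.contains_iff]
          intro h
          rcases List.mem_append.mp h with h | h
          · exact absurd (hpre i h) (by omega)
          · exact absurd (keptIdx_ge _ _ _ _ _ h) (by omega)
        rw [hmem]; simp only [Bool.false_eq_true, if_false]
        exact ih (i + 1) (c + 1) pre acc (fun j hj => by have := hpre j hj; omega)
    · simp only [ha, Bool.false_eq_true, if_false, Bool.not_false, if_true]
      exact ih (i + 1) c pre (acc ++ [' ']) (fun j hj => by have := hpre j hj; omega)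

-- ===== VERDICT (by name: the statement is the Claim_ definition above) =====
theorem multiply_letters_decryption_spec : Claim_equal_multiply_letters_decryption := by
  intro message multiplier _ _
  unfold Spec_multiply_letters_decryption
  unfold multiply_letters_decryption multiply_letters_decryption_alt
  rw [pass1_eq multiplier message.toList 0 0 PySem.Set.empty (by intro j hj; cases hj)]
  simp only [PySem.Set.empty, List.nil_append]
  exact congrArg String.ofList
    (pass2_eq multiplier message.toList 0 0 [] [] (by intro j hj; cases hj)).symm
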